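-- pv_equiv track=rewrite | github.com/andiradulescu/openpilot | system/ui/lib/wpa_ctrl.py | decode_ssid
-- ===== SOURCE A (Python) =====
-- _HEX = "0123456789abcdefABCDEF"
--
-- def decode_ssid(encoded: str) -> str:
--   """Decode a wpa_supplicant printf_encode'd SSID (hostap common.c:526).
--   Escapes: \\\\, \\", \\e/n/r/t, \\xNN/\\xN, octal \\0..\\777.
--   Bytes are reinterpreted as UTF-8; all-null SSIDs (hidden APs) normalize to ""."""
--   out = bytearray()
--   i = 0
--   n = len(encoded)
--   while i < n:
--     c = encoded[i]
--     if c != "\\":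
--       out.append(ord(c) & 0xff)
--       i += 1
--       continue
--
--     i += 1  # consume backslash
--     if i >= n:
--       break  # trailing backslash: dropped
--
--     nxt = encoded[i]
--     if nxt == "\\":
--       out.append(ord("\\"))
--       i += 1
--     elif nxt == '"':
--       out.append(ord('"'))
--       i += 1
--     elif nxt == "n":
--       out.append(ord("\n"))
--       i += 1
--     elif nxt == "r":
--       out.append(ord("\r"))
--       i += 1
--     elif nxt == "t":
--       out.append(ord("\t"))
--       i += 1
--     elif nxt == "e":
--       out.append(0x1b)
--       i += 1
--     elif nxt == "x":
--       i += 1  # consume 'x'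
--       if i + 1 < n and encoded[i] in _HEX and encoded[i + 1] in _HEX:
--         out.append(int(encoded[i:i + 2], 16))
--         i += 2
--       elif i < n and encoded[i] in _HEX:
--         out.append(int(encoded[i], 16))
--         i += 1
--       # else: malformed \x — drop the escape, continue parsing at i
--     elif "0" <= nxt <= "7":
--       val = ord(nxt) - ord("0")
--       i += 1
--       if i < n and "0" <= encoded[i] <= "7":
--         val = val * 8 + (ord(encoded[i]) - ord("0"))
--         i += 1
--         if i < n and "0" <= encoded[i] <= "7":
--           val = val * 8 + (ord(encoded[i]) - ord("0"))
--           i += 1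
--       out.append(val & 0xff)
--     # else: unknown escape — the backslash is consumed, the char falls
--     # through to the next iteration and is appended as a literal.
--
--   if not out or all(b == 0 for b in out):
--     return ""
--   return out.decode("utf-8", errors="replace")
-- ===== SOURCE B (Python) =====
-- import re
--
-- _TOKEN = re.compile(
--     r'\\x[0-9a-fA-F]{2}'   # two-digit hex escape
--     r'|\\x[0-9a-fA-F]'     # one-digit hex escape
--     r'|\\x'                # bare \x: malformed, decodes to nothing
--     r'|\\[0-7]{1,3}'       # octal escape, greedy 1-3 digits
--     r'|\\[\\"nrte]'        # fixed single-char escapes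
--     r'|\\.'                # unknown escape: escaped char taken literally
--     r'|\\\Z'               # trailing lone backslash: dropped
--     r'|.',                 # any other single char, literal
--     re.DOTALL)
--
-- _FIXED = {'\\': 0x5c, '"': 0x22, 'n': 0x0a, 'r': 0x0d, 't': 0x09, 'e': 0x1b}
--
-- def decode_ssid(encoded: str) -> str:
--   out = bytearray()
--   for m in _TOKEN.finditer(encoded):
--     tok = m.group()
--     if tok.startswith('\\x'):
--       if len(tok) > 2:
--         out.append(int(tok[2:], 16))
--     elif tok == '\\':
--       pass  # trailing backslash
--     elif tok.startswith('\\'):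
--       if tok[1] in '01234567':
--         out.append(int(tok[1:], 8) & 0xff)
--       elif tok[1] in _FIXED:
--         out.append(_FIXED[tok[1]])
--       else:
--         out.append(ord(tok[1]) & 0xff)
--     else:
--       out.append(ord(tok) & 0xff)
--   if not out or all(b == 0 for b in out):
--     return ""
--   return out.decode("utf-8", errors="replace")
-- ===== Notes on version B (the rewrite author's own statement) =====
-- stated objective: idiomatic
-- what changed: Replaced A's manual index-walking state machine with a single compiled regex (re.DOTALL) whose ordered alternatives tokenize the string one escape/literal at a time via finditer, keeping the final all-null/UTF-8-replace normalization.
import Mathlib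
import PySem

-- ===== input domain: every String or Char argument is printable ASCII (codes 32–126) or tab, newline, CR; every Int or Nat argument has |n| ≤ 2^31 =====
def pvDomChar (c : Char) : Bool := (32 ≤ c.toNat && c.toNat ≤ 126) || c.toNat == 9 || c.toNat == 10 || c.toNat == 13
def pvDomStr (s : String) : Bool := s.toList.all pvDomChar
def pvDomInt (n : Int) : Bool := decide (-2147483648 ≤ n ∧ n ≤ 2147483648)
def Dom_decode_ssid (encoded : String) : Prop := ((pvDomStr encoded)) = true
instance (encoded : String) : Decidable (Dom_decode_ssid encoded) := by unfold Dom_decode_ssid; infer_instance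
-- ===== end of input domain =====

-- B replaces A's manual index-walking state machine by a one-token-at-a-time
-- tokenizer (a compiled regex with ordered alternatives in Python); objective:
-- idiomatic.  Both programs end with bytes.decode("utf-8", errors="replace"),
-- ported once below as pvUtf8Chars (hand-written, exact: CPython substitutes
-- U+FFFD per maximal subpart exactly as the case analysis below does).

-- shared helper: Python's  bytes(out).decode("utf-8", errors="replace")
def pvCont (b : Nat) : Bool := 128 ≤ b && b ≤ 191

def pvUtf8Chars : List Nat → List Char
  | [] => []
  | b :: rest =>
    if b < 128 then Char.ofNat b :: pvUtf8Chars rest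
    else if b < 194 then '\uFFFD' :: pvUtf8Chars rest          -- 0x80..0xC1: invalid start byte
    else if b < 224 then                                       -- 0xC2..0xDF: 2-byte sequence
      match rest with
      | [] => ['\uFFFD']
      | b2 :: r2 =>
        if pvCont b2 then Char.ofNat ((b - 192) * 64 + (b2 - 128)) :: pvUtf8Chars r2
        else '\uFFFD' :: pvUtf8Chars (b2 :: r2)
    else if b < 240 then                                       -- 0xE0..0xEF: 3-byte sequence
      match rest with
      | [] => ['\uFFFD']
      | b2 :: r2 =>
        if (if b = 224 then 160 else 128) ≤ b2 && b2 ≤ (if b = 237 then 159 else 191) then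
          match r2 with
          | [] => ['\uFFFD']
          | b3 :: r3 =>
            if pvCont b3 then Char.ofNat ((b - 224) * 4096 + (b2 - 128) * 64 + (b3 - 128)) :: pvUtf8Chars r3
            else '\uFFFD' :: pvUtf8Chars (b3 :: r3)
        else '\uFFFD' :: pvUtf8Chars (b2 :: r2)
    else if b < 245 then                                       -- 0xF0..0xF4: 4-byte sequence
      match rest with
      | [] => ['\uFFFD']
      | b2 :: r2 =>
        if (if b = 240 then 144 else 128) ≤ b2 && b2 ≤ (if b = 244 then 143 else 191) then
          match r2 with
          | [] => ['\uFFFD']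
          | b3 :: r3 =>
            if pvCont b3 then
              match r3 with
              | [] => ['\uFFFD']
              | b4 :: r4 =>
                if pvCont b4 then
                  Char.ofNat ((b - 240) * 262144 + (b2 - 128) * 4096 + (b3 - 128) * 64 + (b4 - 128)) :: pvUtf8Chars r4
                else '\uFFFD' :: pvUtf8Chars (b4 :: r4)
            else '\uFFFD' :: pvUtf8Chars (b3 :: r3)
        else '\uFFFD' :: pvUtf8Chars (b2 :: r2)
    else '\uFFFD' :: pvUtf8Chars rest                          -- 0xF5..0xFF: invalid start byte

-- ===== PORT A =====
-- _HEX = "0123456789abcdefABCDEF"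
def pvHEX : List Char := "0123456789abcdefABCDEF".toList

-- int(c, 16) for a single char of _HEX (exact: c is a hex digit when used)
def pvHexVal (c : Char) : Nat :=
  if 97 ≤ c.toNat then c.toNat - 87
  else if 65 ≤ c.toNat then c.toNat - 55
  else c.toNat - 48

-- A's while loop, step for step; reads encoded[i] as cs.getD i (always in range).
def decodeLoopA (cs : List Char) (n i : Nat) (out : List Nat) : List Nat :=
  if _h : i < n then
    let c := cs.getD i 'A'
    if c ≠ '\\' then decodeLoopA cs n (i + 1) (out ++ [c.toNat % 256])
    else if i + 1 ≥ n then out      -- trailing backslash: dropped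
    else
      let nxt := cs.getD (i + 1) 'A'
      if nxt = '\\' then decodeLoopA cs n (i + 2) (out ++ [92])
      else if nxt = '"' then decodeLoopA cs n (i + 2) (out ++ [34])
      else if nxt = 'n' then decodeLoopA cs n (i + 2) (out ++ [10])
      else if nxt = 'r' then decodeLoopA cs n (i + 2) (out ++ [13])
      else if nxt = 't' then decodeLoopA cs n (i + 2) (out ++ [9])
      else if nxt = 'e' then decodeLoopA cs n (i + 2) (out ++ [27])
      else if nxt = 'x' then
        -- i+2 is A's i after consuming backslash and 'x'
        if i + 3 < n ∧ cs.getD (i + 2) 'A' ∈ pvHEX ∧ cs.getD (i + 3) 'A' ∈ pvHEX then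
          -- int(encoded[i:i+2], 16), exact on two hex digits
          decodeLoopA cs n (i + 4) (out ++ [pvHexVal (cs.getD (i + 2) 'A') * 16 + pvHexVal (cs.getD (i + 3) 'A')])
        else if i + 2 < n ∧ cs.getD (i + 2) 'A' ∈ pvHEX then
          decodeLoopA cs n (i + 3) (out ++ [pvHexVal (cs.getD (i + 2) 'A')])
        else decodeLoopA cs n (i + 2) out   -- malformed \x: drop the escape
      else if '0' ≤ nxt ∧ nxt ≤ '7' then
        let v1 := nxt.toNat - 48
        if i + 2 < n ∧ '0' ≤ cs.getD (i + 2) 'A' ∧ cs.getD (i + 2) 'A' ≤ '7' then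
          let v2 := v1 * 8 + ((cs.getD (i + 2) 'A').toNat - 48)
          if i + 3 < n ∧ '0' ≤ cs.getD (i + 3) 'A' ∧ cs.getD (i + 3) 'A' ≤ '7' then
            decodeLoopA cs n (i + 4) (out ++ [(v2 * 8 + ((cs.getD (i + 3) 'A').toNat - 48)) % 256])
          else decodeLoopA cs n (i + 3) (out ++ [v2 % 256])
        else decodeLoopA cs n (i + 2) (out ++ [v1 % 256])
      else decodeLoopA cs n (i + 2) (out ++ [nxt.toNat % 256])
        -- unknown escape: backslash consumed, char appended literally on the
        -- next iteration of A's loop (same as consuming it here)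
  else out
  termination_by n - i

def decode_ssid (encoded : String) : String :=
  let out := decodeLoopA encoded.toList encoded.toList.length 0 []
  if out.isEmpty || out.all (· == 0) then "" else String.ofList (pvUtf8Chars out)

-- ===== PORT B =====
-- Source B's compiled regex, ordered alternatives, matched one token at a time.
def isHexB (c : Char) : Bool := ('0' ≤ c && c ≤ '9') || ('a' ≤ c && c ≤ 'f') || ('A' ≤ c && c ≤ 'F')
def isOctB (c : Char) : Bool := '0' ≤ c && c ≤ '7'

def hexValB (c : Char) : Nat :=
  if 97 ≤ c.toNat then c.toNat - 87
  else if 65 ≤ c.toNat then c.toNat - 55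
  else c.toNat - 48

def tokB : List Char → List Nat
  | [] => []
  | c :: rest =>
    if c = '\\' then
      match rest with
      | [] => []                                           -- r'\\\\Z': trailing backslash, nothing
      | d :: r =>
        if d = 'x' then
          match r with
          | h1 :: h2 :: r2 =>
            if isHexB h1 && isHexB h2 then
              (hexValB h1 * 16 + hexValB h2) :: tokB r2    -- r'\\x..' two hex digits
            else if isHexB h1 then
              hexValB h1 :: tokB (h2 :: r2)                -- r'\\x.' one hex digit
            else tokB (h1 :: h2 :: r2)                     -- bare r'\\x', decodes to nothing
          | [h1] => if isHexB h1 then [hexValB h1] else tokB [h1]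
          | [] => []
        else if isOctB d then                              -- r'\\[0-7]{1,3}' greedy
          match r with
          | o2 :: r2 =>
            if isOctB o2 then
              match r2 with
              | o3 :: r3 =>
                if isOctB o3 then
                  (((d.toNat - 48) * 64 + (o2.toNat - 48) * 8 + (o3.toNat - 48)) % 256) :: tokB r3
                else (((d.toNat - 48) * 8 + (o2.toNat - 48)) % 256) :: tokB (o3 :: r3)
              | [] => [((d.toNat - 48) * 8 + (o2.toNat - 48)) % 256]
            else ((d.toNat - 48) % 256) :: tokB (o2 :: r2)
          | [] => [(d.toNat - 48) % 256]
        else if d = '\\' then 92 :: tokB r               -- fixed escapes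
        else if d = '"' then 34 :: tokB r
        else if d = 'n' then 10 :: tokB r
        else if d = 'r' then 13 :: tokB r
        else if d = 't' then 9 :: tokB r
        else if d = 'e' then 27 :: tokB r
        else (d.toNat % 256) :: tokB r                     -- r'\\.': unknown escape, literal char
    else (c.toNat % 256) :: tokB rest                      -- r'.': any other char, literal
  termination_by cs => cs.length
  decreasing_by all_goals (simp_all; try omega)

def decode_ssid_alt (encoded : String) : String :=
  let out := tokB encoded.toList
  if out.isEmpty || out.all (· == 0) then "" else String.ofList (pvUtf8Chars out)

-- ===== PRECONDITION & SPEC =====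
def Spec_decode_ssid (encoded : String) (out : String) : Prop := out = decode_ssid_alt encoded
instance (encoded : String) (out : String) : Decidable (Spec_decode_ssid encoded out) := by unfold Spec_decode_ssid; infer_instance

-- ===== CLAIM (what is proved, stated in full; the proofs are below) =====
def Claim_equal_decode_ssid : Prop := ∀ (encoded : String), Dom_decode_ssid encoded → Spec_decode_ssid encoded (decode_ssid encoded)

-- ===== LEMMAS AND PROOFS =====

theorem isOct_iff (c : Char) : isOctB c = true ↔ ('0' ≤ c ∧ c ≤ '7') := by
  simp [isOctB]

theorem char_eq_ofNat (c : Char) (m : Nat) (h : c.toNat = m) : c = Char.ofNat m := by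
  rw [← h, Char.ofNat_toNat]

set_option maxRecDepth 4096 in
theorem mem_pvHEX (c : Char) : c ∈ pvHEX ↔ isHexB c = true := by
  constructor
  · intro h
    rw [show pvHEX = ['0','1','2','3','4','5','6','7','8','9','a','b','c','d','e','f','A','B','C','D','E','F'] from rfl] at h
    fin_cases h <;> rfl
  · intro h
    simp only [isHexB, Bool.or_eq_true, Bool.and_eq_true, decide_eq_true_eq] at h
    have h' : 48 ≤ c.toNat ∧ c.toNat ≤ 57 ∨ 97 ≤ c.toNat ∧ c.toNat ≤ 102 ∨ 65 ≤ c.toNat ∧ c.toNat ≤ 70 := by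
      rcases h with (⟨h1, h2⟩ | ⟨h1, h2⟩) | ⟨h1, h2⟩ <;>
        rw [Char.le_def, UInt32.le_iff_toNat_le] at h1 <;>
        rw [Char.le_def, UInt32.le_iff_toNat_le] at h2
      · exact Or.inl ⟨h1, h2⟩
      · exact Or.inr (Or.inl ⟨h1, h2⟩)
      · exact Or.inr (Or.inr ⟨h1, h2⟩)
    have h2 : c.toNat = 48 ∨ c.toNat = 49 ∨ c.toNat = 50 ∨ c.toNat = 51 ∨ c.toNat = 52 ∨ c.toNat = 53 ∨ c.toNat = 54 ∨ c.toNat = 55 ∨ c.toNat = 56 ∨ c.toNat = 57 ∨ c.toNat = 97 ∨ c.toNat = 98 ∨ c.toNat = 99 ∨ c.toNat = 100 ∨ c.toNat = 101 ∨ c.toNat = 102 ∨ c.toNat = 65 ∨ c.toNat = 66 ∨ c.toNat = 67 ∨ c.toNat = 68 ∨ c.toNat = 69 ∨ c.toNat = 70 := by omega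
    rcases h2 with h2|h2|h2|h2|h2|h2|h2|h2|h2|h2|h2|h2|h2|h2|h2|h2|h2|h2|h2|h2|h2|h2 <;>
      (rw [char_eq_ofNat c _ h2]; decide)

theorem oct_toNat (c : Char) (h : '0' ≤ c ∧ c ≤ '7') : 48 ≤ c.toNat ∧ c.toNat ≤ 55 := by
  obtain ⟨h1, h2⟩ := h
  rw [Char.le_def, UInt32.le_iff_toNat_le] at h1 h2
  exact ⟨h1, h2⟩

theorem tokB_lit (c : Char) (rest : List Char) (h : ¬ c = '\\') :
    tokB (c :: rest) = (c.toNat % 256) :: tokB rest := by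
  rw [tokB.eq_def]; simp only [if_neg h]
theorem tokB_trail : tokB ['\\'] = [] := by rw [tokB.eq_def]; simp
theorem tokB_bs (rest : List Char) : tokB ('\\' :: '\\' :: rest) = 92 :: tokB rest := by
  rw [tokB.eq_def]; simp [isOctB]
theorem tokB_quote (rest : List Char) : tokB ('\\' :: '"' :: rest) = 34 :: tokB rest := by
  rw [tokB.eq_def]; simp [isOctB]
theorem tokB_n (rest : List Char) : tokB ('\\' :: 'n' :: rest) = 10 :: tokB rest := by
  rw [tokB.eq_def]; simp [isOctB]
theorem tokB_r (rest : List Char) : tokB ('\\' :: 'r' :: rest) = 13 :: tokB rest := by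
  rw [tokB.eq_def]; simp [isOctB]
theorem tokB_t (rest : List Char) : tokB ('\\' :: 't' :: rest) = 9 :: tokB rest := by
  rw [tokB.eq_def]; simp [isOctB]
theorem tokB_e (rest : List Char) : tokB ('\\' :: 'e' :: rest) = 27 :: tokB rest := by
  rw [tokB.eq_def]; simp [isOctB]
theorem tokB_xnil : tokB ['\\', 'x'] = [] := by rw [tokB.eq_def]; simp
theorem tokB_x1single (h1 : Char) (hx : isHexB h1 = true) : tokB ['\\', 'x', h1] = [hexValB h1] := by
  rw [tokB.eq_def]; simp [hx]
theorem tokB_x0single (h1 : Char) (hx : ¬ isHexB h1 = true) : tokB ['\\', 'x', h1] = tokB [h1] := by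
  rw [tokB.eq_def]; simp [hx]
theorem tokB_x2 (h1 h2 : Char) (r2 : List Char) (hx1 : isHexB h1 = true) (hx2 : isHexB h2 = true) :
    tokB ('\\' :: 'x' :: h1 :: h2 :: r2) = (hexValB h1 * 16 + hexValB h2) :: tokB r2 := by
  rw [tokB.eq_def]; simp [hx1, hx2]
theorem tokB_x1 (h1 h2 : Char) (r2 : List Char) (hx1 : isHexB h1 = true) (hx2 : ¬ isHexB h2 = true) :
    tokB ('\\' :: 'x' :: h1 :: h2 :: r2) = hexValB h1 :: tokB (h2 :: r2) := by
  rw [tokB.eq_def]; simp [hx1, hx2]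
theorem tokB_x0 (h1 h2 : Char) (r2 : List Char) (hx1 : ¬ isHexB h1 = true) :
    tokB ('\\' :: 'x' :: h1 :: h2 :: r2) = tokB (h1 :: h2 :: r2) := by
  rw [tokB.eq_def]; simp [hx1]
theorem oct_ne_x (d : Char) (h : isOctB d = true) : ¬ d = 'x' := by
  intro he; rw [he] at h; simp [isOctB] at h
theorem tokB_oct1nil (d : Char) (h : isOctB d = true) : tokB ['\\', d] = [(d.toNat - 48) % 256] := by
  rw [tokB.eq_def]; simp [oct_ne_x d h, h]
theorem tokB_oct1 (d o2 : Char) (r2 : List Char) (h : isOctB d = true) (h2 : ¬ isOctB o2 = true) :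
    tokB ('\\' :: d :: o2 :: r2) = ((d.toNat - 48) % 256) :: tokB (o2 :: r2) := by
  rw [tokB.eq_def]; simp [oct_ne_x d h, h, h2]
theorem tokB_oct2nil (d o2 : Char) (h : isOctB d = true) (h2 : isOctB o2 = true) :
    tokB ['\\', d, o2] = [((d.toNat - 48) * 8 + (o2.toNat - 48)) % 256] := by
  rw [tokB.eq_def]; simp [oct_ne_x d h, h, h2]
theorem tokB_oct2 (d o2 o3 : Char) (r3 : List Char) (h : isOctB d = true) (h2 : isOctB o2 = true)
    (h3 : ¬ isOctB o3 = true) :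
    tokB ('\\' :: d :: o2 :: o3 :: r3) = (((d.toNat - 48) * 8 + (o2.toNat - 48)) % 256) :: tokB (o3 :: r3) := by
  rw [tokB.eq_def]; simp [oct_ne_x d h, h, h2, h3]
theorem tokB_oct3 (d o2 o3 : Char) (r3 : List Char) (h : isOctB d = true) (h2 : isOctB o2 = true)
    (h3 : isOctB o3 = true) :
    tokB ('\\' :: d :: o2 :: o3 :: r3) = (((d.toNat - 48) * 64 + (o2.toNat - 48) * 8 + (o3.toNat - 48)) % 256) :: tokB r3 := by
  rw [tokB.eq_def]; simp [oct_ne_x d h, h, h2, h3]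
theorem tokB_unk (d : Char) (rest : List Char) (h1 : ¬ d = 'x') (h2 : ¬ isOctB d = true)
    (h3 : ¬ d = '\\') (h4 : ¬ d = '"') (h5 : ¬ d = 'n') (h6 : ¬ d = 'r') (h7 : ¬ d = 't') (h8 : ¬ d = 'e') :
    tokB ('\\' :: d :: rest) = (d.toNat % 256) :: tokB rest := by
  rw [tokB.eq_def]; simp [h1, h2, h3, h4, h5, h6, h7, h8]

theorem pvHexVal_eq (c : Char) : pvHexVal c = hexValB c := rfl

theorem loopA_eq_tokB (cs : List Char) :
    ∀ d i out, cs.length - i ≤ d →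
      decodeLoopA cs cs.length i out = out ++ tokB (cs.drop i) := by
  intro d
  induction d with
  | zero =>
    intro i out hle
    have hge : ¬ i < cs.length := by omega
    rw [decodeLoopA.eq_def, dif_neg hge, List.drop_eq_nil_of_le (by omega)]
    simp [tokB]
  | succ d ih =>
    intro i out hle
    rw [decodeLoopA.eq_def]
    by_cases hi : i < cs.length
    case neg =>
      rw [dif_neg hi, List.drop_eq_nil_of_le (by omega)]; simp [tokB]
    rw [dif_pos hi]
    have hd0 : cs.drop i = cs[i] :: cs.drop (i + 1) := List.drop_eq_getElem_cons hi
    simp only [List.getD_eq_getElem cs 'A' hi]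
    by_cases hb : cs[i] = '\\'
    case neg =>
      rw [if_pos hb, ih _ _ (by omega), hd0, tokB_lit _ _ hb]
      simp
    rw [if_neg (not_not_intro hb)]
    by_cases hend : i + 1 ≥ cs.length
    · rw [if_pos hend, hd0, hb, show cs.drop (i+1) = [] from List.drop_eq_nil_of_le (by omega),
          tokB_trail]
      simp
    rw [if_neg hend]
    have h1lt : i + 1 < cs.length := by omega
    have hd1 : cs.drop (i + 1) = cs[i+1] :: cs.drop (i + 2) := List.drop_eq_getElem_cons h1lt
    simp only [List.getD_eq_getElem cs 'A' h1lt]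
    by_cases hbs : cs[i+1] = '\\'
    · rw [if_pos hbs, ih _ _ (by omega), hd0, hd1, hb, hbs, tokB_bs]; simp
    rw [if_neg hbs]
    by_cases hq : cs[i+1] = '"'
    · rw [if_pos hq, ih _ _ (by omega), hd0, hd1, hb, hq, tokB_quote]; simp
    rw [if_neg hq]
    by_cases hn : cs[i+1] = 'n'
    · rw [if_pos hn, ih _ _ (by omega), hd0, hd1, hb, hn, tokB_n]; simp
    rw [if_neg hn]
    by_cases hr : cs[i+1] = 'r'
    · rw [if_pos hr, ih _ _ (by omega), hd0, hd1, hb, hr, tokB_r]; simp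
    rw [if_neg hr]
    by_cases ht : cs[i+1] = 't'
    · rw [if_pos ht, ih _ _ (by omega), hd0, hd1, hb, ht, tokB_t]; simp
    rw [if_neg ht]
    by_cases he : cs[i+1] = 'e'
    · rw [if_pos he, ih _ _ (by omega), hd0, hd1, hb, he, tokB_e]; simp
    rw [if_neg he]
    by_cases hx : cs[i+1] = 'x'
    · rw [if_pos hx]
      by_cases ha2 : i + 2 < cs.length
      · have hd2 : cs.drop (i + 2) = cs[i+2] :: cs.drop (i + 3) := List.drop_eq_getElem_cons ha2
        simp only [List.getD_eq_getElem cs 'A' ha2]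
        by_cases ha3 : i + 3 < cs.length
        · have hd3 : cs.drop (i + 3) = cs[i+3] :: cs.drop (i + 4) := List.drop_eq_getElem_cons ha3
          simp only [List.getD_eq_getElem cs 'A' ha3]
          by_cases hH1 : isHexB cs[i+2] = true
          · by_cases hH2 : isHexB cs[i+3] = true
            · rw [if_pos ⟨ha3, (mem_pvHEX _).mpr hH1, (mem_pvHEX _).mpr hH2⟩,
                  ih _ _ (by omega), hd0, hd1, hd2, hd3, hb, hx,
                  tokB_x2 _ _ _ hH1 hH2]
              simp [pvHexVal_eq]
            · rw [if_neg (fun h => hH2 ((mem_pvHEX _).mp h.2.2)),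
                  if_pos ⟨ha2, (mem_pvHEX _).mpr hH1⟩,
                  ih _ _ (by omega), hd0, hd1, hd2, hd3, hb, hx,
                  tokB_x1 _ _ _ hH1 hH2]
              simp [pvHexVal_eq]
          · rw [if_neg (fun h => hH1 ((mem_pvHEX _).mp h.2.1)),
                if_neg (fun h => hH1 ((mem_pvHEX _).mp h.2)),
                ih _ _ (by omega), hd0, hd1, hd2, hd3, hb, hx,
                tokB_x0 _ _ _ hH1]
        · have hd3 : cs.drop (i + 3) = [] := List.drop_eq_nil_of_le (by omega)
          by_cases hH1 : isHexB cs[i+2] = true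
          · rw [if_neg (fun h => ha3 h.1),
                if_pos ⟨ha2, (mem_pvHEX _).mpr hH1⟩,
                ih _ _ (by omega), hd0, hd1, hd2, hd3, hb, hx,
                tokB_x1single _ hH1]
            simp [pvHexVal_eq, tokB]
          · rw [if_neg (fun h => ha3 h.1),
                if_neg (fun h => hH1 ((mem_pvHEX _).mp h.2)),
                ih _ _ (by omega), hd0, hd1, hd2, hd3, hb, hx,
                tokB_x0single _ hH1]
      · have hd2 : cs.drop (i + 2) = [] := List.drop_eq_nil_of_le (by omega)
        rw [if_neg (fun h => ha2 (by omega)), if_neg (fun h => ha2 h.1),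
            ih _ _ (by omega), hd0, hd1, hd2, hb, hx, tokB_xnil]
        simp [tokB]
    rw [if_neg hx]
    by_cases hoct : '0' ≤ cs[i+1] ∧ cs[i+1] ≤ '7'
    · rw [if_pos hoct]
      have hO1 : isOctB cs[i+1] = true := (isOct_iff _).mpr hoct
      have n1 := oct_toNat _ hoct
      by_cases ha2 : i + 2 < cs.length
      · have hd2 : cs.drop (i + 2) = cs[i+2] :: cs.drop (i + 3) := List.drop_eq_getElem_cons ha2
        simp only [List.getD_eq_getElem cs 'A' ha2]
        by_cases ho2 : '0' ≤ cs[i+2] ∧ cs[i+2] ≤ '7'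
        · have hO2 : isOctB cs[i+2] = true := (isOct_iff _).mpr ho2
          have n2 := oct_toNat _ ho2
          rw [if_pos ⟨ha2, ho2.1, ho2.2⟩]
          by_cases ha3 : i + 3 < cs.length
          · have hd3 : cs.drop (i + 3) = cs[i+3] :: cs.drop (i + 4) := List.drop_eq_getElem_cons ha3
            simp only [List.getD_eq_getElem cs 'A' ha3]
            by_cases ho3 : '0' ≤ cs[i+3] ∧ cs[i+3] ≤ '7'
            · have hO3 : isOctB cs[i+3] = true := (isOct_iff _).mpr ho3
              have n3 := oct_toNat _ ho3
              rw [if_pos ⟨ha3, ho3.1, ho3.2⟩, ih _ _ (by omega), hd0, hd1, hd2, hd3, hb,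
                  tokB_oct3 _ _ _ _ hO1 hO2 hO3]
              have ev : ((cs[i+1].toNat - 48) * 8 + (cs[i+2].toNat - 48)) * 8 + (cs[i+3].toNat - 48)
                  = (cs[i+1].toNat - 48) * 64 + (cs[i+2].toNat - 48) * 8 + (cs[i+3].toNat - 48) := by omega
              simp [ev]
            · have hO3 : ¬ isOctB cs[i+3] = true := fun h => ho3 ((isOct_iff _).mp h)
              rw [if_neg (fun h => ho3 ⟨h.2.1, h.2.2⟩), ih _ _ (by omega), hd0, hd1, hd2, hd3, hb,
                  tokB_oct2 _ _ _ _ hO1 hO2 hO3]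
              simp
          · have hd3 : cs.drop (i + 3) = [] := List.drop_eq_nil_of_le (by omega)
            rw [if_neg (fun h => ha3 h.1), ih _ _ (by omega), hd0, hd1, hd2, hd3, hb,
                tokB_oct2nil _ _ hO1 hO2]
            simp [tokB]
        · have hO2 : ¬ isOctB cs[i+2] = true := fun h => ho2 ((isOct_iff _).mp h)
          rw [if_neg (fun h => ho2 ⟨h.2.1, h.2.2⟩), ih _ _ (by omega), hd0, hd1, hd2, hb,
              tokB_oct1 _ _ _ hO1 hO2]
          simp
      · have hd2 : cs.drop (i + 2) = [] := List.drop_eq_nil_of_le (by omega)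
        rw [if_neg (fun h => ha2 h.1), ih _ _ (by omega), hd0, hd1, hd2, hb,
            tokB_oct1nil _ hO1]
        simp [tokB]
    · rw [if_neg hoct, ih _ _ (by omega), hd0, hd1, hb,
          tokB_unk _ _ hx (fun h => hoct ((isOct_iff _).mp h)) hbs hq hn hr ht he]
      simp

-- ===== VERDICT (by name: the statement is the Claim_ definition above) =====
theorem decode_ssid_spec : Claim_equal_decode_ssid := by
  intro encoded _
  unfold Spec_decode_ssid decode_ssid decode_ssid_alt
  rw [loopA_eq_tokB encoded.toList encoded.toList.length 0 [] (by omega)]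
  simp
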